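-- pv_equiv track=rewrite | github.com/DylanTheVillain/Determinant | python3/determinant.py | FindRowWithMostZeros
-- ===== SOURCE A (Python) =====
-- def FindRowWithMostZeros(matrix):
-- 	rowIndex = None
-- 	count = None
-- 	for row in range(len(matrix)):
-- 		newCount = matrix[row].count(0)
-- 		if rowIndex == None:
-- 			rowIndex = row
-- 			count = newCount
-- 		elif count < newCount:
-- 			count = newCount
-- 			rowIndex = row
-- 	return rowIndex
-- ===== SOURCE B (Python) =====
-- def FindRowWithMostZeros(matrix):
--     order = sorted(range(len(matrix)), key=lambda i: -matrix[i].count(0))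
--     return order[0] if order else None
-- ===== Notes on version B (the rewrite author's own statement) =====
-- stated objective: alternative
-- what changed: Replaced A's fused best-so-far scan with a sort: stably sort the row indices by negated zero count and return the head, which by sort stability is the first row with the most zeros (None on empty input).
import Mathlib
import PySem

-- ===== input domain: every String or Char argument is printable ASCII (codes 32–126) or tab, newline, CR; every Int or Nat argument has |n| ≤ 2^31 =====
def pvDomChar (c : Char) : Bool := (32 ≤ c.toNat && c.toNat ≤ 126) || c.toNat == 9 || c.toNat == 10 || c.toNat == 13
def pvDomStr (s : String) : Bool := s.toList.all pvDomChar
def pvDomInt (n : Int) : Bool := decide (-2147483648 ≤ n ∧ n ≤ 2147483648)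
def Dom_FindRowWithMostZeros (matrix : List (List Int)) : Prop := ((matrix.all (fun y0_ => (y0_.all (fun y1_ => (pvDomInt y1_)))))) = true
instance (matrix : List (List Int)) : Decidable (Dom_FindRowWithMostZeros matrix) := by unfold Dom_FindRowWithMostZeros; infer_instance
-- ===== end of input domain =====

-- B replaces A's fused best-so-far scan with a stable sort of the row indices by negated zero count followed by taking the head; same result, different algorithm.

-- ===== PORT A =====
-- literal transliteration of A's loop over range(len(matrix)) with state (rowIndex, count)
def FindRowWithMostZeros (matrix : List (List Int)) : Option Int :=
  ((PySem.List.pyRange 0 matrix.length 1).foldl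
    (fun (st : Option Int × Option Int) row =>
      let newCount : Int := (PySem.List.count (PySem.List.pyGetD matrix row []) 0 : Int)
      match st with
      | (none, _) => (some row, some newCount)
      | (some ri, some c) =>
          if c < newCount then (some row, some newCount) else (some ri, some c)
      | (some ri, none) => (some ri, none))  -- unreachable: count is set whenever rowIndex is
    (none, none)).1

-- ===== PORT B =====
-- literal transliteration of Source B: sorted(range(len(matrix)), key=lambda i: -matrix[i].count(0)); order[0] if order else None
def FindRowWithMostZeros_alt (matrix : List (List Int)) : Option Int :=
  let order : List Int :=
    PySem.List.sorted (PySem.List.pyRange 0 matrix.length 1)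
      (fun i => -((PySem.List.count (PySem.List.pyGetD matrix i []) 0 : Int))) false
  match order with
  | [] => none
  | m :: _ => some m

-- ===== PRECONDITION & SPEC =====
def Spec_FindRowWithMostZeros (matrix : List (List Int)) (out : Option Int) : Prop := out = FindRowWithMostZeros_alt matrix
instance (matrix : List (List Int)) (out : Option Int) : Decidable (Spec_FindRowWithMostZeros matrix out) := by unfold Spec_FindRowWithMostZeros; infer_instance

-- ===== CLAIM (what is proved, stated in full; the proofs are below) =====
def Claim_equal_FindRowWithMostZeros : Prop := ∀ (matrix : List (List Int)), Dom_FindRowWithMostZeros matrix → Spec_FindRowWithMostZeros matrix (FindRowWithMostZeros matrix)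

-- ===== LEMMAS AND PROOFS =====

-- the "first strict minimum of the key" one-state fold
def pvStepMin (key : Int → Int) (best : Option Int) (x : Int) : Option Int :=
  match best with
  | none => some x
  | some b => if key x < key b then some x else best

-- head of insertBy (the insertion step of PySem's stable sort)
lemma head?_insertBy (key : Int → Int) (x : Int) (acc : List Int) :
    (PySem.List.insertBy (fun a b => decide (key a < key b)) x acc).head? =
      some ((pvStepMin key acc.head? x).getD x) := by
  cases acc with
  | nil => simp [PySem.List.insertBy, pvStepMin]
  | cons y ys =>
    simp only [PySem.List.insertBy, pvStepMin, List.head?_cons]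
    by_cases h : key x < key y <;> simp [h]

-- head of the stable sort = first strict-min-key element, as a fold
lemma head?_sorted_eq_foldl (key : Int → Int) (xs : List Int) :
    (PySem.List.sorted xs key false).head? = xs.foldl (pvStepMin key) none := by
  rw [PySem.List.sorted_eq_foldl_insertBy]
  suffices h : ∀ (l : List Int) (acc : List Int),
      (l.foldl (fun acc x => PySem.List.insertBy (fun a b => decide (key a < key b)) x acc) acc).head?
        = l.foldl (pvStepMin key) acc.head? by
    exact h xs []
  intro l
  induction l with
  | nil => intro acc; rfl
  | cons x t ih =>
    intro acc
    simp only [List.foldl_cons]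
    rw [ih]
    congr 1
    rw [head?_insertBy]
    cases acc with
    | nil => rfl
    | cons y ys =>
      simp only [List.head?_cons, pvStepMin]
      by_cases h : key x < key y <;> simp [h]

-- A's two-field fold with an established best (ri, cnt ri) tracks the one-field min fold
lemma pvFold_pair (cnt : Int → Int) (l : List Int) :
    ∀ ri : Int,
    (l.foldl
      (fun (st : Option Int × Option Int) row =>
        match st with
        | (none, _) => (some row, some (cnt row))
        | (some ri, some c) =>
            if c < cnt row then (some row, some (cnt row)) else (some ri, some c)
        | (some ri, none) => (some ri, none))
      (some ri, some (cnt ri))).1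
    = l.foldl (pvStepMin (fun i => -(cnt i))) (some ri) := by
  induction l with
  | nil => intro ri; rfl
  | cons x t ih =>
    intro ri
    simp only [List.foldl_cons, pvStepMin]
    by_cases h : cnt ri < cnt x
    · have h' : -(cnt x) < -(cnt ri) := by omega
      simp only [if_pos h, if_pos h']
      exact ih x
    · have h' : ¬ -(cnt x) < -(cnt ri) := by omega
      simp only [if_neg h, if_neg h']
      exact ih ri

theorem pv_main (matrix : List (List Int)) :
    FindRowWithMostZeros matrix = FindRowWithMostZeros_alt matrix := by
  unfold FindRowWithMostZeros FindRowWithMostZeros_alt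
  by_cases hmat : matrix = []
  · subst hmat
    simp [PySem.List.pyRange, PySem.List.sorted]
  · have hpos : (0 : Int) < (matrix.length : Int) := by
      have : matrix.length ≠ 0 := fun h => hmat (List.eq_nil_of_length_eq_zero h)
      omega
    have hcons : PySem.List.pyRange 0 (matrix.length : Int) 1 =
        0 :: PySem.List.pyRange 1 (matrix.length : Int) 1 :=
      PySem.List.pyRange_one_cons hpos
    rw [hcons]
    refine Eq.trans
      (pvFold_pair (fun i => (PySem.List.count (PySem.List.pyGetD matrix i []) 0 : Int))
        (PySem.List.pyRange 1 (matrix.length : Int) 1) 0) ?_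
    have hhead := head?_sorted_eq_foldl
      (fun i => -((PySem.List.count (PySem.List.pyGetD matrix i []) 0 : Int)))
      (0 :: PySem.List.pyRange 1 (matrix.length : Int) 1)
    refine Eq.trans (b := (PySem.List.sorted (0 :: PySem.List.pyRange 1 (matrix.length : Int) 1)
        (fun i => -((PySem.List.count (PySem.List.pyGetD matrix i []) 0 : Int))) false).head?) ?_ ?_
    · exact hhead.symm
    · cases hs : PySem.List.sorted (0 :: PySem.List.pyRange 1 (matrix.length : Int) 1)
          (fun i => -((PySem.List.count (PySem.List.pyGetD matrix i []) 0 : Int))) false with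
      | nil =>
        exfalso
        have := (PySem.List.sorted_eq_nil_iff _ _ _).mp hs
        simp at this
      | cons m t => simp

-- ===== VERDICT (by name: the statement is the Claim_ definition above) =====
theorem FindRowWithMostZeros_spec : Claim_equal_FindRowWithMostZeros := by
  intro matrix _
  unfold Spec_FindRowWithMostZeros
  exact pv_main matrix
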